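-- pv_equiv track=rewrite | github.com/flirc/pyIRDecoder | pyIRDecoder/pronto.py | zero_one_sequences
-- ===== SOURCE A (Python) =====
-- def zero_one_sequences(string, delay):
--     final_data = []
--     ind = 0
--     n = len(string)
--     while True:
--         count_up = 0
--         count_down = 0
--         while ind < n and string[ind] == "0":
--             ind += 1
--
--         while ind < n and string[ind] == "1":
--             count_up += 1
--             ind += 1
--
--         while ind < n and string[ind] == "0":
--             count_down += 1
--             ind += 1
--
--         final_data.extend([delay*count_up, -delay * count_down])
--         if ind >= n:
--             break
--
--     if final_data[-1] == 0:
--         final_data[-1] = -10000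
--     else:
--         final_data[-1] -= 10000
--
--     return final_data
-- ===== SOURCE B (Python) =====
-- def zero_one_sequences(string, delay):
--     # Pass 1: run-length encode the string into (char, run_length) pairs.
--     runs = []
--     i = 0
--     n = len(string)
--     while i < n:
--         j = i
--         while j < n and string[j] == string[i]:
--             j += 1
--         runs.append((string[i], j - i))
--         i = j
--     # Drop a single leading '0'-run.
--     if runs and runs[0][0] == "0":
--         runs = runs[1:]
--     # Pass 2: pair up ('1'-run, '0'-run) lengths; runs at least once.
--     out = []
--     k = 0
--     m = len(runs)
--     while True:
--         count_up = 0
--         if k < m and runs[k][0] == "1":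
--             count_up = runs[k][1]
--             k += 1
--         count_down = 0
--         if k < m and runs[k][0] == "0":
--             count_down = runs[k][1]
--             k += 1
--         out.append(delay * count_up)
--         out.append(-delay * count_down)
--         if k >= m:
--             break
--     out[-1] = -10000 if out[-1] == 0 else out[-1] - 10000
--     return out
-- ===== Notes on version B (the rewrite author's own statement) =====
-- stated objective: alternative
-- what changed: Replaces A's single-cursor nested-while state machine with a two-pass design: first run-length encode the string into (char,length) runs, drop one leading '0'-run, then pair consecutive '1'/'0' run lengths into the output.
import Mathlib
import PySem

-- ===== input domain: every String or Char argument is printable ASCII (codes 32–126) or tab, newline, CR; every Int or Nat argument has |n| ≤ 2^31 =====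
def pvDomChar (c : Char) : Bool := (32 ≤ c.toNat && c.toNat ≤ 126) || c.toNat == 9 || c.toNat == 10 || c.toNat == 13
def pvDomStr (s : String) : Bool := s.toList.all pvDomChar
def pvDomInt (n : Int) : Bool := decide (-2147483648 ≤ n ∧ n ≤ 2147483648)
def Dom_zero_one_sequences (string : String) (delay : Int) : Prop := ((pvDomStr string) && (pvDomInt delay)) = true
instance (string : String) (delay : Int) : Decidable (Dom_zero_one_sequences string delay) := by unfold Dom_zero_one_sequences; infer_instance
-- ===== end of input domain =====

-- B replaces A's single-cursor nested-while state machine by a run-length-encoding pass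
-- followed by a run-pairing pass (objective: alternative decomposition, same cost).

-- ===== PORT A =====
-- `while ind < n and string[ind] == c: ind += 1` on the remaining suffix
def aSkip (c : Char) : List Char → List Char
  | [] => []
  | x :: xs => if x = c then aSkip c xs else x :: xs

-- the counting whiles: how many leading `c`s were consumed, and the rest
def aCount (c : Char) : List Char → Nat × List Char
  | [] => (0, [])
  | x :: xs => if x = c then ((aCount c xs).1 + 1, (aCount c xs).2) else (0, x :: xs)

-- A's `while True` outer loop; fuel = n+1 outer iterations suffices on Pre_ inputs
def aLoop (delay : Int) : Nat → List Char → List Int → List Int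
  | 0, _, acc => acc
  | fuel+1, rest, acc =>
    let r1 := aSkip '0' rest
    let cu := aCount '1' r1
    let cd := aCount '0' cu.2
    let acc' := acc ++ [delay * (cu.1 : Int), -delay * (cd.1 : Int)]
    if cd.2.isEmpty then acc' else aLoop delay fuel cd.2 acc'

-- the final `if final_data[-1] == 0: … else: …` adjustment
def aAdjust (l : List Int) : List Int :=
  match l.getLast? with
  | none => l
  | some x => l.dropLast ++ [if x = 0 then (-10000 : Int) else x - 10000]

def zero_one_sequences (string : String) (delay : Int) : List Int :=
  aAdjust (aLoop delay (string.toList.length + 1) string.toList [])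

-- ===== PORT B =====
-- inner `while j < n and string[j] == string[i]: j += 1` of the RLE pass
def bTake (c : Char) : List Char → Nat × List Char
  | [] => (0, [])
  | x :: xs => if x = c then ((bTake c xs).1 + 1, (bTake c xs).2) else (0, x :: xs)

theorem bTake_len (c : Char) (l : List Char) : (bTake c l).2.length ≤ l.length := by
  induction l with
  | nil => simp [bTake]
  | cons x xs ih => by_cases h : x = c <;> simp [bTake, h] <;> omega

-- pass 1: run-length encode into (char, run-length) pairs
def bRuns : List Char → List (Char × Nat)
  | [] => []
  | c :: cs => (c, (bTake c cs).1 + 1) :: bRuns (bTake c cs).2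
termination_by l => l.length
decreasing_by simpa using Nat.lt_succ_of_le (bTake_len c cs)

-- `if runs and runs[0][0] == "0": runs = runs[1:]`
def bDropLead : List (Char × Nat) → List (Char × Nat)
  | [] => []
  | (c, k) :: t => if c = '0' then t else (c, k) :: t

-- pass 2: B's `while True` pairing loop over the runs; fuel = m+1 suffices on Pre_ inputs
def bLoop (delay : Int) : Nat → List (Char × Nat) → List Int → List Int
  | 0, _, out => out
  | fuel+1, rs, out =>
    let s1 : Nat × List (Char × Nat) :=
      match rs with
      | (c, k) :: t => if c = '1' then (k, t) else (0, rs)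
      | [] => (0, rs)
    let s2 : Nat × List (Char × Nat) :=
      match s1.2 with
      | (c, k) :: t => if c = '0' then (k, t) else (0, s1.2)
      | [] => (0, s1.2)
    let out' := out ++ [delay * (s1.1 : Int), -delay * (s2.1 : Int)]
    if s2.2.isEmpty then out' else bLoop delay fuel s2.2 out'

-- the final `out[-1] = -10000 if out[-1] == 0 else out[-1] - 10000`
def bAdjust (l : List Int) : List Int :=
  match l.getLast? with
  | none => l
  | some x => l.dropLast ++ [if x = 0 then (-10000 : Int) else x - 10000]

def zero_one_sequences_alt (string : String) (delay : Int) : List Int :=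
  let runs := bDropLead (bRuns string.toList)
  bAdjust (bLoop delay (runs.length + 1) runs [])

-- ===== PRECONDITION & SPEC =====
-- Pre_ admits exactly the strings made of '0'/'1' characters: on any other
-- character both A's and B's cursor loops stop advancing and A never returns
-- (infinite loop), so nothing can be claimed there.
def Pre_zero_one_sequences (string : String) (delay : Int) : Prop :=
  string.toList.all (fun c => c == '0' || c == '1') = true
instance (string : String) (delay : Int) : Decidable (Pre_zero_one_sequences string delay) := by
  unfold Pre_zero_one_sequences; infer_instance
def pvWitness_zero_one_sequences : String × Int := ("0011010", 5)

def Spec_zero_one_sequences (string : String) (delay : Int) (out : List Int) : Prop :=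
  out = zero_one_sequences_alt string delay
instance (string : String) (delay : Int) (out : List Int) : Decidable (Spec_zero_one_sequences string delay out) := by
  unfold Spec_zero_one_sequences; infer_instance

-- ===== CLAIM (what is proved, stated in full; the proofs are below) =====
def Claim_equal_zero_one_sequences : Prop := ∀ (string : String) (delay : Int), Dom_zero_one_sequences string delay → Pre_zero_one_sequences string delay → Spec_zero_one_sequences string delay (zero_one_sequences string delay)


-- ===== LEMMAS AND PROOFS =====

theorem bTake_eq_aCount (c : Char) (l : List Char) : bTake c l = aCount c l := by
  induction l with
  | nil => rfl
  | cons x xs ih => by_cases h : x = c <;> simp [bTake, aCount, h, ih]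

theorem aCount_len (c : Char) (l : List Char) : (aCount c l).2.length ≤ l.length := by
  induction l with
  | nil => simp [aCount]
  | cons x xs ih => by_cases h : x = c <;> simp [aCount, h] <;> omega

theorem aCount_mem (c : Char) (l : List Char) : ∀ x ∈ (aCount c l).2, x ∈ l := by
  induction l with
  | nil => simp [aCount]
  | cons y ys ih =>
    by_cases h : y = c
    · simp only [aCount, h, if_pos rfl]
      intro x hx; exact List.mem_cons_of_mem _ (ih x hx)
    · simp [aCount, h]

theorem aCount_snd_head (c : Char) (l : List Char) (x : Char) (t : List Char)
    (h : (aCount c l).2 = x :: t) : x ≠ c := by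
  induction l with
  | nil => simp [aCount] at h
  | cons y ys ih =>
    by_cases hy : y = c
    · exact ih (by simpa [aCount, hy] using h)
    · simp [aCount, hy] at h; exact h.1 ▸ hy

theorem aSkip_eq (c : Char) (l : List Char) : aSkip c l = (aCount c l).2 := by
  induction l with
  | nil => rfl
  | cons x xs ih => by_cases h : x = c <;> simp [aSkip, aCount, h, ih]

theorem aSkip_len (c : Char) (l : List Char) : (aSkip c l).length ≤ l.length := by
  rw [aSkip_eq]; exact aCount_len c l

theorem aSkip_mem (c : Char) (l : List Char) : ∀ x ∈ aSkip c l, x ∈ l := by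
  rw [aSkip_eq]; exact aCount_mem c l

theorem aSkip_head (c : Char) (l : List Char) (x : Char) (t : List Char)
    (h : aSkip c l = x :: t) : x ≠ c := by
  rw [aSkip_eq] at h; exact aCount_snd_head c l x t h

theorem bRuns_cons (c : Char) (cs : List Char) :
    bRuns (c :: cs) = (c, (aCount c cs).1 + 1) :: bRuns (aCount c cs).2 := by
  rw [bRuns]; simp [bTake_eq_aCount]

theorem bRuns_nil_iff (l : List Char) : bRuns l = [] ↔ l = [] := by
  cases l with
  | nil => simp [bRuns]
  | cons c cs => simp [bRuns_cons]

theorem dropLead_bRuns (l : List Char) :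
    bDropLead (bRuns l) = bRuns (aSkip '0' l) := by
  cases l with
  | nil => simp [bRuns, bDropLead, aSkip]
  | cons c cs =>
    by_cases h : c = '0'
    · subst h
      rw [bRuns_cons]
      simp [bDropLead, aSkip, aSkip_eq]
    · rw [bRuns_cons]
      simp [bDropLead, h, aSkip, bRuns_cons]

theorem aAdjust_eq_bAdjust (l : List Int) : aAdjust l = bAdjust l := rfl

theorem aLoop_succ (delay : Int) (f : Nat) (rest : List Char) (acc : List Int) :
    aLoop delay (f + 1) rest acc =
      if (aCount '0' (aCount '1' (aSkip '0' rest)).2).2.isEmpty then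
        acc ++ [delay * ((aCount '1' (aSkip '0' rest)).1 : Int),
          -delay * ((aCount '0' (aCount '1' (aSkip '0' rest)).2).1 : Int)]
      else
        aLoop delay f (aCount '0' (aCount '1' (aSkip '0' rest)).2).2
          (acc ++ [delay * ((aCount '1' (aSkip '0' rest)).1 : Int),
            -delay * ((aCount '0' (aCount '1' (aSkip '0' rest)).2).1 : Int)]) := rfl

theorem bLoop_nil (delay : Int) (g : Nat) (out : List Int) :
    bLoop delay (g + 1) [] out = out ++ [0, 0] := by simp [bLoop]

theorem bLoop_one (delay : Int) (g : Nat) (k : Nat) (out : List Int) :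
    bLoop delay (g + 1) [('1', k)] out = out ++ [delay * (k : Int), 0] := by simp [bLoop]

theorem bLoop_pair (delay : Int) (g : Nat) (k m : Nat) (t : List (Char × Nat)) (out : List Int) :
    bLoop delay (g + 1) (('1', k) :: ('0', m) :: t) out =
      if t.isEmpty then out ++ [delay * (k : Int), -delay * (m : Int)]
      else bLoop delay g t (out ++ [delay * (k : Int), -delay * (m : Int)]) := by
  cases t <;> simp [bLoop]

-- simulation: A's cursor loop equals B's pairing loop over the precomputed runs
theorem sim (delay : Int) : ∀ (f : Nat) (rest : List Char) (g : Nat) (acc : List Int),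
    (∀ c ∈ rest, c = '0' ∨ c = '1') →
    rest.length < f → (bDropLead (bRuns rest)).length < g →
    aLoop delay f rest acc = bLoop delay g (bDropLead (bRuns rest)) acc := by
  intro f
  induction f with
  | zero => intro rest g acc _ hf _; omega
  | succ f ih =>
    intro rest g acc hbin hf hg
    obtain ⟨g', rfl⟩ : ∃ g', g = g' + 1 := ⟨g - 1, by omega⟩
    have hdl : bDropLead (bRuns rest) = bRuns (aSkip '0' rest) := dropLead_bRuns rest
    have hbin1 : ∀ c ∈ aSkip '0' rest, c = '0' ∨ c = '1' := fun c hc =>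
      hbin c (aSkip_mem _ _ c hc)
    have hlen1 : (aSkip '0' rest).length ≤ rest.length := aSkip_len _ _
    rw [hdl, aLoop_succ]
    cases hr1c : aSkip '0' rest with
    | nil => simp [aCount, bRuns, bLoop_nil]
    | cons x cs1 =>
      have hx1 : x = '1' := by
        rcases hbin1 x (hr1c ▸ List.mem_cons_self ..) with h0 | h1
        · exact absurd h0 (aSkip_head '0' rest x cs1 hr1c)
        · exact h1
      subst hx1
      rw [hr1c] at hlen1
      simp only [List.length_cons] at hlen1
      have hcu : aCount '1' ('1' :: cs1) = ((aCount '1' cs1).1 + 1, (aCount '1' cs1).2) := by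
        simp [aCount]
      have hbin2 : ∀ c ∈ (aCount '1' cs1).2, c = '0' ∨ c = '1' := fun c hc =>
        hbin1 c (hr1c ▸ List.mem_cons_of_mem _ (aCount_mem _ _ c hc))
      have hlen2 : (aCount '1' cs1).2.length ≤ cs1.length := aCount_len _ _
      rw [hcu, bRuns_cons]
      cases hr2c : (aCount '1' cs1).2 with
      | nil => simp [aCount, bRuns, bLoop_one]
      | cons y cs2 =>
        have hy0 : y = '0' := by
          rcases hbin2 y (hr2c ▸ List.mem_cons_self ..) with h0 | h1
          · exact h0
          · exact absurd h1 (aCount_snd_head '1' cs1 y cs2 hr2c)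
        subst hy0
        rw [hr2c] at hlen2
        simp only [List.length_cons] at hlen2
        have hcd : aCount '0' ('0' :: cs2) = ((aCount '0' cs2).1 + 1, (aCount '0' cs2).2) := by
          simp [aCount]
        have hbin3 : ∀ c ∈ (aCount '0' cs2).2, c = '0' ∨ c = '1' := fun c hc =>
          hbin2 c (hr2c ▸ List.mem_cons_of_mem _ (aCount_mem _ _ c hc))
        have hlen3 : (aCount '0' cs2).2.length ≤ cs2.length := aCount_len _ _
        rw [hcd, bRuns_cons, bLoop_pair]
        by_cases hr3e : (aCount '0' cs2).2 = []
        · simp [hr3e, bRuns]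
        · have hdrop3 : bDropLead (bRuns (aCount '0' cs2).2) = bRuns (aCount '0' cs2).2 := by
            rw [dropLead_bRuns]
            cases hr3c : (aCount '0' cs2).2 with
            | nil => rfl
            | cons z t =>
              have hz : z ≠ '0' := aCount_snd_head '0' cs2 z t hr3c
              simp [aSkip, hz]
          have hflen : (aCount '0' cs2).2.length < f := by omega
          have hglen : (bDropLead (bRuns (aCount '0' cs2).2)).length < g' := by
            rw [hdrop3]
            have hlg : (bDropLead (bRuns rest)).length = (bRuns (aCount '0' cs2).2).length + 2 := by
              rw [hdl, hr1c, bRuns_cons, hr2c, bRuns_cons]; simp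
            omega
          have hrec := ih (aCount '0' cs2).2 g'
            (acc ++ [delay * (((aCount '1' cs1).1 + 1 : Nat) : Int),
              -delay * (((aCount '0' cs2).1 + 1 : Nat) : Int)]) hbin3 hflen hglen
          rw [hdrop3] at hrec
          have hAe : ¬ ((aCount '0' cs2).2.isEmpty = true) := by
            simp [List.isEmpty_iff, hr3e]
          have hBe : ¬ ((bRuns (aCount '0' cs2).2).isEmpty = true) := by
            simp [List.isEmpty_iff, bRuns_nil_iff, hr3e]
          rw [if_neg hAe, if_neg hBe]
          simpa using hrec

theorem zero_one_sequences_spec : Claim_equal_zero_one_sequences := by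
  intro string delay _ hpre
  unfold Spec_zero_one_sequences zero_one_sequences zero_one_sequences_alt
  have hbin : ∀ c ∈ string.toList, c = '0' ∨ c = '1' := by
    intro c hc
    have := List.all_eq_true.mp hpre c hc
    rcases Bool.or_eq_true_iff.mp this with h | h
    · exact Or.inl (by simpa using h)
    · exact Or.inr (by simpa using h)
  rw [aAdjust_eq_bAdjust]
  rw [sim delay (string.toList.length + 1) string.toList
      ((bDropLead (bRuns string.toList)).length + 1) [] hbin (by omega) (by omega)]
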